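-- pv_equiv track=rewrite | github.com/chenxingqiang/Nvidia-Software-Ecosystem | generators/software_ecosystem_report.py | _dedupe_tech_names
-- ===== SOURCE A (Python) =====
-- from typing import Any, Dict, List, Tuple
--
-- def _norm_tech_name(name: str) -> str:
--     return " ".join((name or "").replace("\n", " ").split()).strip()
--
-- def _dedupe_tech_names(names: List[str], limit: int) -> List[str]:
--     """Merge case/whitespace variants; keep a readable representative."""
--     by_key: Dict[str, str] = {}
--     for raw in names:
--         n = _norm_tech_name(raw)
--         if not n or len(n) > 120:
--             continue
--         key = n.lower()
--         if key not in by_key or len(n) > len(by_key[key]):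
--             by_key[key] = n
--     out = sorted(by_key.values(), key=lambda x: (-len(x), x.lower()))
--     return out[:limit]
-- ===== SOURCE B (Python) =====
-- from typing import List
--
-- def _dedupe_tech_names(names: List[str], limit: int) -> List[str]:
--     cleaned = []
--     for raw in names:
--         n = " ".join((raw or "").replace("\n", " ").split()).strip()
--         if n and len(n) <= 120:
--             cleaned.append(n)
--     cleaned.sort(key=lambda x: (-len(x), x.lower()))
--     seen = set()
--     result = []
--     for x in cleaned:
--         k = x.lower()
--         if k not in seen:
--             seen.add(k)
--             result.append(x)
--     return result[:limit]
-- ===== Notes on version B (the rewrite author's own statement) =====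
-- stated objective: alternative
-- what changed: Replaces A's dedupe-then-sort strategy (a dict keyed by lowercase name whose value is overwritten by strictly longer variants, then sorting the dict values) with a sort-then-scan strategy: normalize and filter all names, stably sort the whole list once by (-len, lower), then keep the first occurrence of each lowercase key in a single seen-set pass.
import Mathlib
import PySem

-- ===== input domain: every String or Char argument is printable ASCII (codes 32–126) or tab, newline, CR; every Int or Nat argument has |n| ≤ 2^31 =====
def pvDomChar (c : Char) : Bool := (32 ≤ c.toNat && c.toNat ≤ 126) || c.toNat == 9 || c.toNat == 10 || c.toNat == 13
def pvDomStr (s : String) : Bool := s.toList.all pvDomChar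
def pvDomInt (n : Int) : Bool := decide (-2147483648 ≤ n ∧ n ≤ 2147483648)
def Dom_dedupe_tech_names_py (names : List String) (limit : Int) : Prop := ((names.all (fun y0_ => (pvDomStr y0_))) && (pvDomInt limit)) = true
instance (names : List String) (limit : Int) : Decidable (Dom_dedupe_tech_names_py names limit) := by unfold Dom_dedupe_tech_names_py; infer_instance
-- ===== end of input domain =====

-- B replaces A's dict-with-longest-wins dedupe (a dict keyed by lowercase whose values are
-- then sorted) by one stable sort of all normalized names followed by a single seen-set pass
-- keeping the first representative per lowercase key (objective: alternative).


-- ===== PORT A =====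
-- _norm_tech_name ('name or ""' is the identity on every string argument)
def pvNormTechName (name : String) : String :=
  PySem.Str.strip (PySem.Str.join " " (PySem.Str.split₀ (PySem.Str.replace name "\n" " ")))

-- the body of A's loop after the 'continue' filter: keep the longest representative per key
def pvUpd (d : PySem.Dict String String) (n : String) : PySem.Dict String String :=
  if d.contains (PySem.Str.lower n) = false ∨
      PySem.Str.len n > PySem.Str.len (d.getD (PySem.Str.lower n) "") then d.insert (PySem.Str.lower n) n
  else d

def dedupe_tech_names_py (names : List String) (limit : Int) : List String :=
  let by_key : PySem.Dict String String := names.foldl (fun d raw =>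
    let n := pvNormTechName raw
    if n = "" ∨ PySem.Str.len n > 120 then d else pvUpd d n) PySem.Dict.empty
  let out := PySem.List.sorted2 by_key.values (fun x => -(PySem.Str.len x)) (fun x => PySem.Str.lower x)
  PySem.List.slice out none (some limit)

-- ===== PORT B =====
def dedupe_tech_names_py_alt (names : List String) (limit : Int) : List String :=
  let cleaned := names.foldl (fun acc raw =>
    let n := PySem.Str.strip (PySem.Str.join " " (PySem.Str.split₀ (PySem.Str.replace raw "\n" " ")))
    if n ≠ "" ∧ PySem.Str.len n ≤ 120 then acc ++ [n] else acc) []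
  let sortedC := PySem.List.sorted2 cleaned (fun x => -(PySem.Str.len x)) (fun x => PySem.Str.lower x)
  let result := (sortedC.foldl (fun (p : PySem.Set String × List String) x =>
    let k := PySem.Str.lower x
    if p.1.contains k then p else (p.1.add k, p.2 ++ [x])) (PySem.Set.ofList [], [])).2
  PySem.List.slice result none (some limit)

-- ===== PRECONDITION & SPEC =====
def Spec_dedupe_tech_names_py (names : List String) (limit : Int) (out : List String) : Prop := out = dedupe_tech_names_py_alt names limit
instance (names : List String) (limit : Int) (out : List String) : Decidable (Spec_dedupe_tech_names_py names limit out) := by unfold Spec_dedupe_tech_names_py; infer_instance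

-- ===== CLAIM (what is proved, stated in full; the proofs are below) =====
def Claim_equal_dedupe_tech_names_py : Prop := ∀ (names : List String) (limit : Int), Dom_dedupe_tech_names_py names limit → Spec_dedupe_tech_names_py names limit (dedupe_tech_names_py names limit)

-- ===== LEMMAS AND PROOFS =====

def pvCleaned (names : List String) : List String :=
  names.filterMap (fun raw =>
    let n := pvNormTechName raw
    if n ≠ "" ∧ PySem.Str.len n ≤ 120 then some n else none)

lemma pv_bfold_cleaned (names : List String) (acc : List String) :
    names.foldl (fun acc raw =>
      let n := PySem.Str.strip (PySem.Str.join " " (PySem.Str.split₀ (PySem.Str.replace raw "\n" " ")))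
      if n ≠ "" ∧ PySem.Str.len n ≤ 120 then acc ++ [n] else acc) acc
    = acc ++ pvCleaned names := by
  induction names generalizing acc with
  | nil => simp only [List.foldl_nil, pvCleaned, List.filterMap_nil, List.append_nil]
  | cons r rest ih =>
    simp only [List.foldl_cons, pvCleaned, List.filterMap_cons]
    by_cases h : pvNormTechName r ≠ "" ∧ PySem.Str.len (pvNormTechName r) ≤ 120
    · have h' : PySem.Str.strip (PySem.Str.join " " (PySem.Str.split₀ (PySem.Str.replace r "\n" " "))) ≠ "" ∧
          PySem.Str.len (PySem.Str.strip (PySem.Str.join " " (PySem.Str.split₀ (PySem.Str.replace r "\n" " ")))) ≤ 120 := h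
      rw [if_pos h', if_pos h, ih]
      simp only [List.append_assoc, List.singleton_append]
      rfl
    · have h' : ¬ (PySem.Str.strip (PySem.Str.join " " (PySem.Str.split₀ (PySem.Str.replace r "\n" " "))) ≠ "" ∧
          PySem.Str.len (PySem.Str.strip (PySem.Str.join " " (PySem.Str.split₀ (PySem.Str.replace r "\n" " ")))) ≤ 120) := h
      rw [if_neg h', if_neg h, ih]
      rfl

lemma pv_afold_cleaned (names : List String) (d : PySem.Dict String String) :
    names.foldl (fun d raw =>
      let n := pvNormTechName raw
      if n = "" ∨ PySem.Str.len n > 120 then d else pvUpd d n) d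
    = (pvCleaned names).foldl pvUpd d := by
  induction names generalizing d with
  | nil => simp only [List.foldl_nil, pvCleaned, List.filterMap_nil]
  | cons r rest ih =>
    simp only [List.foldl_cons, pvCleaned, List.filterMap_cons]
    by_cases h : pvNormTechName r = "" ∨ PySem.Str.len (pvNormTechName r) > 120
    · have h2 : ¬ (pvNormTechName r ≠ "" ∧ PySem.Str.len (pvNormTechName r) ≤ 120) := by
        rcases h with h | h
        · simp [h]
        · intro hc; omega
      rw [if_pos h, if_neg h2, ih]
      rfl
    · push_neg at h
      have h2 : pvNormTechName r ≠ "" ∧ PySem.Str.len (pvNormTechName r) ≤ 120 := ⟨h.1, by omega⟩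
      rw [if_neg (by push_neg; exact ⟨h.1, h.2⟩), if_pos h2, ih]
      rfl

def pvK (x : String) : Int ×ₗ String := toLex (-(PySem.Str.len x), PySem.Str.lower x)

lemma pv_before_eq (a b : String) :
    (decide ((-(PySem.Str.len a) : Int) < -(PySem.Str.len b)) ||
      !decide ((-(PySem.Str.len b) : Int) < -(PySem.Str.len a)) &&
        decide (PySem.Str.lower a < PySem.Str.lower b))
    = decide (pvK a < pvK b) := by
  simp [pvK, Prod.Lex.lt_iff]
  rcases Nat.lt_trichotomy a.length b.length with h | h | h
  · simp [h, Nat.lt_asymm h, Nat.ne_of_lt h, Nat.not_lt_of_lt h]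
  · simp [h]
  · simp [h, Nat.lt_asymm h, (Nat.ne_of_lt h).symm, Nat.not_lt_of_lt h]

lemma pv_sorted2_eq_sorted_K (xs : List String) :
    PySem.List.sorted2 xs (fun x => -(PySem.Str.len x)) (fun x => PySem.Str.lower x)
      = PySem.List.sorted xs pvK := by
  show List.foldl (fun acc x => PySem.List.insertBy _ x acc) [] xs
      = List.foldl (fun acc x => PySem.List.insertBy _ x acc) [] xs
  have hbe : (fun a b : String =>
        decide ((-(PySem.Str.len a) : Int) < -(PySem.Str.len b)) ||
          !decide ((-(PySem.Str.len b) : Int) < -(PySem.Str.len a)) &&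
            decide (PySem.Str.lower a < PySem.Str.lower b))
      = fun a b => decide (pvK a < pvK b) := by
    funext a b; exact pv_before_eq a b
  rw [hbe]

def pvInv (d : PySem.Dict String String) : Prop :=
  (∀ p ∈ d.items, p.1 = PySem.Str.lower p.2) ∧ d.keys.Nodup

lemma pv_inv_empty : pvInv PySem.Dict.empty := by
  constructor
  · intro p hp; simp [PySem.Dict.empty] at hp
  · simp [PySem.Dict.empty, PySem.Dict.keys]

lemma pv_inv_upd (d : PySem.Dict String String) (h : pvInv d) (n : String) : pvInv (pvUpd d n) := by
  unfold pvUpd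
  split
  · constructor
    · intro p hp
      rcases Bool.eq_false_or_eq_true (d.contains (PySem.Str.lower n)) with hc | hc
      · rw [PySem.Dict.items_insert_of_contains d n hc] at hp
        rcases List.mem_map.mp hp with ⟨q, hq, he⟩
        by_cases hqk : q.1 = PySem.Str.lower n
        · simp [hqk] at he; subst he; rfl
        · simp [hqk] at he; subst he; exact h.1 q hq
      · rw [PySem.Dict.items_insert_of_not_contains d n hc] at hp
        rcases List.mem_append.mp hp with hp | hp
        · exact h.1 p hp
        · simp at hp; subst hp; rfl
    · exact PySem.Dict.nodup_keys_insert d _ n h.2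
  · exact h

lemma pv_inv_foldl (cs : List String) (d : PySem.Dict String String) (h : pvInv d) :
    pvInv (cs.foldl pvUpd d) := by
  induction cs generalizing d with
  | nil => exact h
  | cons c rest ih => exact ih _ (pv_inv_upd d h c)

lemma pv_find?_insertBy_of_neg {α : Type} (before : α → α → Bool) (p : α → Bool) (c : α)
    (T : List α) (hc : p c = false) :
    (PySem.List.insertBy before c T).find? p = T.find? p := by
  induction T with
  | nil => simp [PySem.List.insertBy, List.find?, hc]
  | cons y ys ih =>
    unfold PySem.List.insertBy
    split
    · simp [List.find?_cons, hc]
    · rcases hy : p y with hy' | hy' <;> simp [List.find?_cons, hy, ih]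

lemma pvUpd_eq (d : PySem.Dict String String) (n : String) :
    pvUpd d n = if d.contains (PySem.Str.lower n) = false ∨
      PySem.Str.len n > PySem.Str.len (d.getD (PySem.Str.lower n) "") then d.insert (PySem.Str.lower n) n
    else d := rfl

lemma pv_K_lt_same_low (c v : String) (h : PySem.Str.lower c = PySem.Str.lower v) :
    pvK c < pvK v ↔ PySem.Str.len v < PySem.Str.len c := by
  simp [pvK, Prod.Lex.lt_iff, h]

lemma pv_K_eq_low (a b : String) (h : pvK a = pvK b) : PySem.Str.lower a = PySem.Str.lower b := by
  have := congrArg (fun p => (ofLex p).2) h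
  simpa [pvK] using this

lemma pv_find?_insertBy_of_pos (p : String → Bool) (c : String) (T : List String)
    (hc : p c = true) (hs : T.Pairwise (fun a b => pvK a ≤ pvK b)) :
    (PySem.List.insertBy (fun a b => decide (pvK a < pvK b)) c T).find? p =
      match T.find? p with
      | none => some c
      | some t => if pvK c < pvK t then some c else some t := by
  induction T with
  | nil => simp [PySem.List.insertBy, List.find?, hc]
  | cons y ys ih =>
    unfold PySem.List.insertBy
    by_cases hcy : pvK c < pvK y
    · rw [if_pos (by simpa using hcy)]
      rcases hy : p y with _ | _
      · -- p y = false
        simp only [List.find?_cons, hy, hc]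
        rcases hfy : ys.find? p with _ | t
        · simp [List.find?_cons, hc, hy, hfy]
        · have ht : t ∈ ys := List.mem_of_find?_eq_some hfy
          have hyt : pvK y ≤ pvK t := (List.pairwise_cons.mp hs).1 t ht
          simp [List.find?_cons, hc, hy, hfy, lt_of_lt_of_le hcy hyt]
      · simp [List.find?_cons, hc, hy, hcy]
    · rw [if_neg (by simpa using hcy)]
      rcases hy : p y with _ | _
      · simp only [List.find?_cons, hy]
        exact ih (List.pairwise_cons.mp hs).2
      · simp [List.find?_cons, hy, hcy]

lemma pv_sorted_append (cs : List String) (c : String) :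
    PySem.List.sorted (cs ++ [c]) pvK
      = PySem.List.insertBy (fun a b => decide (pvK a < pvK b)) c (PySem.List.sorted cs pvK) := by
  unfold PySem.List.sorted
  rw [List.foldl_append]
  rfl

lemma pv_get?_eq_find?_sorted (cs : List String) (k : String) :
    (cs.foldl pvUpd PySem.Dict.empty).get? k
      = (PySem.List.sorted cs pvK).find? (fun y => PySem.Str.lower y == k) := by
  induction cs using List.reverseRecOn with
  | nil => simp [PySem.Dict.empty, PySem.Dict.get?, PySem.List.sorted]
  | append_singleton cs c ih =>
    rw [List.foldl_append, List.foldl_cons, List.foldl_nil, pv_sorted_append]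
    by_cases hk : PySem.Str.lower c = k
    · subst hk
      have hpc : (fun y => PySem.Str.lower y == PySem.Str.lower c) c = true := by simp
      rw [pv_find?_insertBy_of_pos _ c _ hpc (PySem.List.sorted_pairwise cs pvK), ← ih, pvUpd_eq]
      rcases hG : (cs.foldl pvUpd PySem.Dict.empty).get? (PySem.Str.lower c) with _ | v
      · have hcont : (cs.foldl pvUpd PySem.Dict.empty).contains (PySem.Str.lower c) = false :=
          (PySem.Dict.get?_eq_none_iff_contains _ _).mp hG
        rw [if_pos (Or.inl hcont), PySem.Dict.get?_insert_self]
      · have hinv := pv_inv_foldl cs PySem.Dict.empty pv_inv_empty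
        have hcont : (cs.foldl pvUpd PySem.Dict.empty).contains (PySem.Str.lower c) = true := by
          rw [PySem.Dict.contains_eq_isSome_get?, hG]; rfl
        have hv : (cs.foldl pvUpd PySem.Dict.empty).getD (PySem.Str.lower c) "" = v := by
          rw [PySem.Dict.getD_eq_get?_getD, hG]; rfl
        have hmem : (PySem.Str.lower c, v) ∈ (cs.foldl pvUpd PySem.Dict.empty).items :=
          (PySem.Dict.get?_eq_some_iff_mem_items _ _ v hinv.2).mp hG
        have hlowv : PySem.Str.lower c = PySem.Str.lower v := hinv.1 _ hmem
        have hmatch : (match (some v : Option String) with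
            | none => some c
            | some t => if pvK c < pvK t then some c else some t)
            = if pvK c < pvK v then some c else some v := rfl
        rw [hmatch]
        by_cases hlen : PySem.Str.len v < PySem.Str.len c
        · rw [if_pos (Or.inr (by rw [hv]; exact hlen)), PySem.Dict.get?_insert_self,
            if_pos ((pv_K_lt_same_low c v hlowv).mpr hlen)]
        · rw [if_neg (by
              rw [hv]
              push_neg
              refine ⟨by simp [hcont], by omega⟩),
            if_neg (fun hlt => hlen ((pv_K_lt_same_low c v hlowv).mp hlt))]
          exact hG
    · have hpc : (fun y => PySem.Str.lower y == k) c = false := by simp [hk]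
      rw [pv_find?_insertBy_of_neg _ _ c _ hpc, ← ih, pvUpd_eq]
      split
      · exact PySem.Dict.get?_insert_of_ne _ _ (fun h => hk h.symm)
      · rfl

lemma pv_mem_values_iff (cs : List String) (x : String) :
    x ∈ (cs.foldl pvUpd PySem.Dict.empty).values ↔
      (cs.foldl pvUpd PySem.Dict.empty).get? (PySem.Str.lower x) = some x := by
  have hinv := pv_inv_foldl cs PySem.Dict.empty pv_inv_empty
  constructor
  · intro hx
    rcases List.mem_map.mp hx with ⟨p, hp, he⟩
    have h1 : p.1 = PySem.Str.lower x := by rw [hinv.1 p hp, he]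
    have : (PySem.Str.lower x, x) ∈ (cs.foldl pvUpd PySem.Dict.empty).items := by
      have : p = (PySem.Str.lower x, x) := by
        cases p; simp at h1 he ⊢; exact ⟨h1, he⟩
      rwa [this] at hp
    exact (PySem.Dict.get?_eq_some_iff_mem_items _ _ x hinv.2).mpr this
  · intro h
    have hmem := (PySem.Dict.get?_eq_some_iff_mem_items _ _ x hinv.2).mp h
    exact List.mem_map.mpr ⟨_, hmem, rfl⟩

lemma pv_values_nodup (cs : List String) :
    (cs.foldl pvUpd PySem.Dict.empty).values.Nodup := by
  have hinv := pv_inv_foldl cs PySem.Dict.empty pv_inv_empty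
  have hmap : (cs.foldl pvUpd PySem.Dict.empty).values.map PySem.Str.lower
      = (cs.foldl pvUpd PySem.Dict.empty).keys := by
    unfold PySem.Dict.values PySem.Dict.keys
    rw [List.map_map]
    exact (List.map_congr_left (fun p hp => (hinv.1 p hp).symm))
  have := hinv.2
  rw [← hmap] at this
  exact this.of_map

def pvStep (p : PySem.Set String × List String) (x : String) : PySem.Set String × List String :=
  if p.1.contains (PySem.Str.lower x) then p else (p.1.add (PySem.Str.lower x), p.2 ++ [x])

lemma pv_mem_dedupGo (S : List String) (seen : PySem.Set String) (acc : List String) (x : String) :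
    x ∈ (S.foldl pvStep (seen, acc)).2 ↔
      x ∈ acc ∨ (PySem.Str.lower x ∉ seen ∧
        S.find? (fun y => PySem.Str.lower y == PySem.Str.lower x) = some x) := by
  induction S generalizing seen acc with
  | nil => simp
  | cons y S' ih =>
    rw [List.foldl_cons]
    by_cases hy : seen.contains (PySem.Str.lower y) = true
    · have hmem : PySem.Str.lower y ∈ seen := (PySem.Set.contains_iff seen _).mp hy
      have hstep : pvStep (seen, acc) y = (seen, acc) := by simp [pvStep, hmem]
      rw [hstep, ih]
      by_cases hxy : PySem.Str.lower y = PySem.Str.lower x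
      · have hfx : PySem.Str.lower x ∈ seen := hxy ▸ hmem
        simp [hfx]
      · rw [List.find?_cons_of_neg (by simp [hxy])]
    · have hnmem : PySem.Str.lower y ∉ seen := fun hm => hy ((PySem.Set.contains_iff seen _).mpr hm)
      have hstep : pvStep (seen, acc) y = (seen.add (PySem.Str.lower y), acc ++ [y]) := by
        simp [pvStep, hnmem]
      rw [hstep, ih]
      by_cases hxy : PySem.Str.lower y = PySem.Str.lower x
      · rw [List.find?_cons_of_pos (by simp [hxy])]
        simp only [List.mem_append, List.mem_singleton, PySem.Set.mem_add, not_or,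
          Option.some.injEq]
        constructor
        · rintro ((h | h) | ⟨⟨h1, h2⟩, h3⟩)
          · exact Or.inl h
          · exact Or.inr ⟨hxy ▸ hnmem, h.symm⟩
          · exact absurd hxy.symm h2
        · rintro (h | ⟨h1, h2⟩)
          · exact Or.inl (Or.inl h)
          · exact Or.inl (Or.inr h2.symm)
      · rw [List.find?_cons_of_neg (by simp [hxy])]
        simp only [List.mem_append, List.mem_singleton, PySem.Set.mem_add, not_or]
        constructor
        · rintro ((h | h) | ⟨⟨h1, h2⟩, h3⟩)
          · exact Or.inl h
          · exact absurd (congrArg PySem.Str.lower h) (fun he => hxy he.symm)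
          · exact Or.inr ⟨h1, h3⟩
        · rintro (h | ⟨h1, h2⟩)
          · exact Or.inl (Or.inl h)
          · exact Or.inr ⟨⟨h1, fun he => hxy he.symm⟩, h2⟩

lemma pv_dedupGo_sublist (S : List String) (seen : PySem.Set String) (acc : List String) :
    (S.foldl pvStep (seen, acc)).2.Sublist (acc ++ S) := by
  induction S generalizing seen acc with
  | nil => simp
  | cons y S' ih =>
    rw [List.foldl_cons]
    by_cases hy : seen.contains (PySem.Str.lower y) = true
    · have hmem : PySem.Str.lower y ∈ seen := (PySem.Set.contains_iff seen _).mp hy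
      have hstep : pvStep (seen, acc) y = (seen, acc) := by simp [pvStep, hmem]
      rw [hstep]
      exact (ih seen acc).trans (List.Sublist.append_left (List.sublist_cons_self y S') acc)
    · have hnmem : PySem.Str.lower y ∉ seen := fun hm => hy ((PySem.Set.contains_iff seen _).mpr hm)
      have hstep : pvStep (seen, acc) y = (seen.add (PySem.Str.lower y), acc ++ [y]) := by
        simp [pvStep, hnmem]
      rw [hstep]
      have := ih (seen.add (PySem.Str.lower y)) (acc ++ [y])
      simpa using this

lemma pv_dedupGo_keys_distinct (S : List String) (seen : PySem.Set String) (acc : List String)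
    (h1 : ∀ a ∈ acc, PySem.Str.lower a ∈ seen)
    (h2 : acc.Pairwise (fun a b => PySem.Str.lower a ≠ PySem.Str.lower b)) :
    (S.foldl pvStep (seen, acc)).2.Pairwise (fun a b => PySem.Str.lower a ≠ PySem.Str.lower b) := by
  induction S generalizing seen acc with
  | nil => exact h2
  | cons y S' ih =>
    rw [List.foldl_cons]
    by_cases hy : seen.contains (PySem.Str.lower y) = true
    · have hmem : PySem.Str.lower y ∈ seen := (PySem.Set.contains_iff seen _).mp hy
      have hstep : pvStep (seen, acc) y = (seen, acc) := by simp [pvStep, hmem]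
      rw [hstep]; exact ih seen acc h1 h2
    · have hnmem : PySem.Str.lower y ∉ seen := fun hm => hy ((PySem.Set.contains_iff seen _).mpr hm)
      have hstep : pvStep (seen, acc) y = (seen.add (PySem.Str.lower y), acc ++ [y]) := by
        simp [pvStep, hnmem]
      rw [hstep]
      refine ih _ _ ?_ ?_
      · intro a ha
        rcases List.mem_append.mp ha with ha | ha
        · exact (PySem.Set.mem_add seen _ _).mpr (Or.inl (h1 a ha))
        · simp at ha; subst ha; exact (PySem.Set.mem_add seen _ _).mpr (Or.inr rfl)
      · refine List.pairwise_append.mpr ⟨h2, List.pairwise_singleton _ _, ?_⟩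
        intro a ha b hb
        simp at hb; subst hb
        exact fun he => hnmem (he ▸ h1 a ha)

lemma pv_core (cs : List String) :
    PySem.List.sorted (cs.foldl pvUpd PySem.Dict.empty).values pvK
      = ((PySem.List.sorted cs pvK).foldl pvStep (PySem.Set.ofList [], [])).2 := by
  have hRsub : ((PySem.List.sorted cs pvK).foldl pvStep (PySem.Set.ofList [], [])).2.Sublist
      (PySem.List.sorted cs pvK) := by
    simpa using pv_dedupGo_sublist (PySem.List.sorted cs pvK) (PySem.Set.ofList []) []
  have hRkeys := pv_dedupGo_keys_distinct (PySem.List.sorted cs pvK) (PySem.Set.ofList []) []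
    (by intro a ha; simp at ha) (List.Pairwise.nil)
  have hRle : ((PySem.List.sorted cs pvK).foldl pvStep (PySem.Set.ofList [], [])).2.Pairwise
      (fun a b => pvK a ≤ pvK b) :=
    (PySem.List.sorted_pairwise cs pvK).sublist hRsub
  have hRlt : ((PySem.List.sorted cs pvK).foldl pvStep (PySem.Set.ofList [], [])).2.Pairwise
      (fun a b => pvK a < pvK b) := by
    refine (hRle.and hRkeys).imp ?_
    rintro a b ⟨h1, h2⟩
    exact lt_of_le_of_ne h1 (fun he => h2 (pv_K_eq_low a b he))
  have hRnd : ((PySem.List.sorted cs pvK).foldl pvStep (PySem.Set.ofList [], [])).2.Nodup :=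
    hRkeys.imp (fun hne he => hne (by rw [he]))
  have hVnd := pv_values_nodup cs
  have hmem : ∀ x, x ∈ ((PySem.List.sorted cs pvK).foldl pvStep (PySem.Set.ofList [], [])).2 ↔
      x ∈ (cs.foldl pvUpd PySem.Dict.empty).values := by
    intro x
    rw [pv_mem_dedupGo, pv_mem_values_iff, pv_get?_eq_find?_sorted]
    simp
  exact PySem.List.sorted_eq_of_perm_of_pairwise_lt _ _ pvK
    ((List.perm_ext_iff_of_nodup hRnd hVnd).mpr hmem) hRlt

-- ===== VERDICT (by name: the statement is the Claim_ definition above) =====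
theorem dedupe_tech_names_py_spec : Claim_equal_dedupe_tech_names_py := by
  intro names limit _
  unfold Spec_dedupe_tech_names_py
  have hA : dedupe_tech_names_py names limit
      = PySem.List.slice
          (PySem.List.sorted ((pvCleaned names).foldl pvUpd PySem.Dict.empty).values pvK)
          none (some limit) := by
    simp only [dedupe_tech_names_py]
    rw [pv_afold_cleaned, pv_sorted2_eq_sorted_K]
  have estep : (fun (p : PySem.Set String × List String) (x : String) =>
      let k := PySem.Str.lower x
      if p.1.contains k then p else (p.1.add k, p.2 ++ [x])) = pvStep := rfl
  have hB : dedupe_tech_names_py_alt names limit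
      = PySem.List.slice
          (((PySem.List.sorted (pvCleaned names) pvK).foldl pvStep (PySem.Set.ofList [], [])).2)
          none (some limit) := by
    simp only [dedupe_tech_names_py_alt]
    rw [pv_bfold_cleaned, List.nil_append, pv_sorted2_eq_sorted_K, estep]
  rw [hA, hB, pv_core]
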